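-- pv_equiv track=rewrite | github.com/catInWater/kua-test | draw_bucket_assignment_snapshots.py | bucket_data_summary
-- ===== SOURCE A (Python) =====
-- import collections
--
-- def bucket_data_summary(events_by_node):
--     by_bucket = collections.defaultdict(list)
--     for bucket_map in events_by_node.values():
--         for bucket_id, names in bucket_map.items():
--             for name in names:
--                 if name not in by_bucket[bucket_id]:
--                     by_bucket[bucket_id].append(name)
--     return by_bucket
-- ===== SOURCE B (Python) =====
-- import collections
--
-- def bucket_data_summary(events_by_node):
--     # phase 1: gather every name per bucket across all nodes (no dedup yet)
--     merged = collections.defaultdict(list)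
--     for bucket_map in events_by_node.values():
--         for bucket_id, names in bucket_map.items():
--             if names:
--                 merged[bucket_id].extend(names)
--     # phase 2: dedup each bucket keeping first-occurrence order
--     result = collections.defaultdict(list)
--     for bucket_id, names in merged.items():
--         result[bucket_id] = list(dict.fromkeys(names))
--     return result
-- ===== Notes on version B (the rewrite author's own statement) =====
-- stated objective: faster
-- what changed: A dedups with a per-name linear membership scan of the growing bucket list; B first gathers all names per bucket with plain appends and then dedups each bucket once via dict.fromkeys (first-occurrence order).
import Mathlib
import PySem

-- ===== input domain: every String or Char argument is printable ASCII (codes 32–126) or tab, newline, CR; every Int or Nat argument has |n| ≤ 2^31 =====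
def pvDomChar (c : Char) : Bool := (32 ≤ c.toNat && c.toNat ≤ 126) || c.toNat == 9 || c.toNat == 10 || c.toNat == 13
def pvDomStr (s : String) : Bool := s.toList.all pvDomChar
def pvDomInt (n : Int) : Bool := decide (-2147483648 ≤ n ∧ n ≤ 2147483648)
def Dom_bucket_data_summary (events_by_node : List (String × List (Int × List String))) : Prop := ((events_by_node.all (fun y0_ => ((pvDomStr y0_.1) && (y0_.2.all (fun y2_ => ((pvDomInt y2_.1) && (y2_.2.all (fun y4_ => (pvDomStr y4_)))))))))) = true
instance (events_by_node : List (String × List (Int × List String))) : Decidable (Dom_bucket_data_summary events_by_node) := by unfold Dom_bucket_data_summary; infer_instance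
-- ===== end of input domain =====

-- B replaces A's per-name quadratic membership scan by a two-phase gather-then-dedup pass
-- (append everything per bucket, then dedup each bucket once keeping first occurrences).
-- Return values only are compared (both build fresh defaultdicts; no argument is mutated).

-- ===== PORT A =====
def bucket_data_summary (events_by_node : List (String × List (Int × List String))) : List (Int × List String) :=
  (events_by_node.foldl (fun by_bucket node =>
    node.2.foldl (fun by_bucket item =>
      item.2.foldl (fun bb name =>
        let cur := bb.getD item.1 []
        if name ∈ cur then bb.insert item.1 cur
        else bb.insert item.1 (cur ++ [name])) by_bucket) by_bucket)
    (PySem.Dict.empty : PySem.Dict Int (List String))).items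

-- ===== PORT B =====
def bucket_data_summary_alt (events_by_node : List (String × List (Int × List String))) : List (Int × List String) :=
  let merged := events_by_node.foldl (fun m node =>
    node.2.foldl (fun m item =>
      if item.2 = [] then m
      else m.insert item.1 (m.getD item.1 [] ++ item.2)) m)
    (PySem.Dict.empty : PySem.Dict Int (List String))
  (merged.items.foldl (fun r p => r.insert p.1 (PySem.List.dedup p.2))
    (PySem.Dict.empty : PySem.Dict Int (List String))).items

-- ===== PRECONDITION & SPEC =====
-- Pre_ excludes association lists with duplicate dict keys (outer node names or bucket ids
-- within one node), which no actual Python dict argument can represent.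
def Pre_bucket_data_summary (events_by_node : List (String × List (Int × List String))) : Prop :=
  (events_by_node.map (·.1)).Nodup ∧ ∀ p ∈ events_by_node, (p.2.map (·.1)).Nodup
instance (events_by_node : List (String × List (Int × List String))) : Decidable (Pre_bucket_data_summary events_by_node) := by unfold Pre_bucket_data_summary; infer_instance
def pvWitness_bucket_data_summary : (List (String × List (Int × List String))) :=
  [("a", [(0, ["x", "y", "x"]), (1, [])]), ("b", [(0, ["y", "z"])])]

def Spec_bucket_data_summary (events_by_node : List (String × List (Int × List String))) (out : List (Int × List String)) : Prop := out = bucket_data_summary_alt events_by_node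
instance (events_by_node : List (String × List (Int × List String))) (out : List (Int × List String)) : Decidable (Spec_bucket_data_summary events_by_node out) := by unfold Spec_bucket_data_summary; infer_instance

-- ===== CLAIM (what is proved, stated in full; the proofs are below) =====
def Claim_equal_bucket_data_summary : Prop := ∀ (events_by_node : List (String × List (Int × List String))), Dom_bucket_data_summary events_by_node → Pre_bucket_data_summary events_by_node → Spec_bucket_data_summary events_by_node (bucket_data_summary events_by_node)

-- ===== LEMMAS AND PROOFS =====


-- helper abbreviation used only by the proofs
def pvDed (p : Int × List String) : Int × List String := (p.1, PySem.List.dedup p.2)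

-- A's innermost per-name loop at key k collapses to one insert of a Set.update.
theorem pv_innerA (k : Int) (names : List String) (d : PySem.Dict Int (List String))
    (h : names ≠ []) :
    names.foldl (fun bb name =>
      let cur := bb.getD k []
      if name ∈ cur then bb.insert k cur else bb.insert k (cur ++ [name])) d
    = d.insert k (PySem.Set.update (d.getD k []) names) := by
  induction names generalizing d with
  | nil => cases h rfl
  | cons n rest ih =>
    simp only [List.foldl_cons]
    have hstep : (if n ∈ d.getD k [] then d.insert k (d.getD k [])
        else d.insert k (d.getD k [] ++ [n])) = d.insert k (PySem.Set.add (d.getD k []) n) := by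
      by_cases hm : n ∈ d.getD k []
      · simp [hm]
      · simp [hm]
    rw [hstep]
    by_cases hr : rest = []
    · subst hr
      simp [PySem.Set.update_cons, PySem.Set.update_nil]
    · rw [ih _ hr, PySem.Dict.getD_insert_self, PySem.Dict.insert_insert_self,
        PySem.Set.update_cons]

-- lookup in the dedup-mapped dict
theorem pv_get?_mk_map (l : List (Int × List String)) (k : Int) :
    (PySem.Dict.mk (l.map pvDed)).get? k = ((PySem.Dict.mk l).get? k).map PySem.List.dedup := by
  induction l with
  | nil => rfl
  | cons p rest ih =>
    obtain ⟨a, b⟩ := p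
    by_cases hk : a == k
    · simp [pvDed, PySem.Dict.get?_mk_cons, hk]
    · simp [pvDed, PySem.Dict.get?_mk_cons, hk, ih]

theorem pv_getD_mk_map (l : List (Int × List String)) (k : Int) :
    (PySem.Dict.mk (l.map pvDed)).getD k [] = PySem.List.dedup ((PySem.Dict.mk l).getD k []) := by
  rw [PySem.Dict.getD_eq_get?_getD, PySem.Dict.getD_eq_get?_getD, pv_get?_mk_map]
  cases (PySem.Dict.mk l).get? k <;> simp [PySem.List.dedup]

theorem pv_mk_items (d : PySem.Dict Int (List String)) : PySem.Dict.mk d.items = d := by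
  cases d; rfl

theorem pv_contains_mk_map (l : List (Int × List String)) (k : Int) :
    (PySem.Dict.mk (l.map pvDed)).contains k = (PySem.Dict.mk l).contains k := by
  rw [PySem.Dict.contains_eq_isSome_get?, PySem.Dict.contains_eq_isSome_get?, pv_get?_mk_map]
  cases (PySem.Dict.mk l).get? k <;> rfl

theorem pv_insert_mk_map (l : List (Int × List String)) (k : Int) (w : List String) :
    (PySem.Dict.mk (l.map pvDed)).insert k (PySem.List.dedup w)
    = PySem.Dict.mk (((PySem.Dict.mk l).insert k w).items.map pvDed) := by
  apply PySem.Dict.ext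
  simp only [PySem.Dict.items_insert, pv_contains_mk_map]
  by_cases hc : (PySem.Dict.mk l).contains k
  · simp only [hc, if_pos, List.map_map]
    apply List.map_congr_left
    intro p _
    by_cases hk : p.1 = k <;> simp [pvDed, hk]
  · simp [hc, pvDed]

theorem pv_stepR (m : PySem.Dict Int (List String)) (k : Int) (names : List String) :
    names.foldl (fun bb name =>
      let cur := bb.getD k []
      if name ∈ cur then bb.insert k cur else bb.insert k (cur ++ [name]))
      (PySem.Dict.mk (m.items.map pvDed))
    = PySem.Dict.mk (((if names = [] then m
        else m.insert k (m.getD k [] ++ names)).items.map pvDed)) := by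
  by_cases h : names = []
  · subst h; rfl
  · rw [pv_innerA k names _ h, if_neg h]
    have h1 : (PySem.Dict.mk (m.items.map pvDed)).getD k [] = PySem.List.dedup (m.getD k []) := by
      have h0 := pv_getD_mk_map m.items k
      rwa [pv_mk_items] at h0
    have h2 : PySem.Set.update (PySem.List.dedup (m.getD k [])) names
        = PySem.List.dedup (m.getD k [] ++ names) := by
      simp [PySem.List.dedup_eq_ofList, PySem.Set.ofList_append]
    rw [h1, h2, pv_insert_mk_map, pv_mk_items]

theorem pv_nodeR (items : List (Int × List String)) (m : PySem.Dict Int (List String)) :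
    items.foldl (fun bb it => it.2.foldl (fun bb name =>
      let cur := bb.getD it.1 []
      if name ∈ cur then bb.insert it.1 cur else bb.insert it.1 (cur ++ [name])) bb)
      (PySem.Dict.mk (m.items.map pvDed))
    = PySem.Dict.mk ((items.foldl (fun m it => if it.2 = [] then m
        else m.insert it.1 (m.getD it.1 [] ++ it.2)) m).items.map pvDed) := by
  induction items generalizing m with
  | nil => rfl
  | cons it rest ih =>
    simp only [List.foldl_cons]
    rw [pv_stepR m it.1 it.2]
    exact ih _

theorem pv_outerR (nodes : List (String × List (Int × List String)))
    (m : PySem.Dict Int (List String)) :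
    nodes.foldl (fun bb node => node.2.foldl (fun bb it => it.2.foldl (fun bb name =>
      let cur := bb.getD it.1 []
      if name ∈ cur then bb.insert it.1 cur else bb.insert it.1 (cur ++ [name])) bb) bb)
      (PySem.Dict.mk (m.items.map pvDed))
    = PySem.Dict.mk ((nodes.foldl (fun m node => node.2.foldl (fun m it => if it.2 = [] then m
        else m.insert it.1 (m.getD it.1 [] ++ it.2)) m) m).items.map pvDed) := by
  induction nodes generalizing m with
  | nil => rfl
  | cons node rest ih =>
    simp only [List.foldl_cons]
    rw [pv_nodeR node.2 m]
    exact ih _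

theorem pv_nodup_node (items : List (Int × List String)) (m : PySem.Dict Int (List String))
    (h : m.keys.Nodup) :
    ((items.foldl (fun m it => if it.2 = [] then m
       else m.insert it.1 (m.getD it.1 [] ++ it.2)) m).keys.Nodup) := by
  induction items generalizing m with
  | nil => exact h
  | cons it rest ih =>
    simp only [List.foldl_cons]
    apply ih
    by_cases he : it.2 = []
    · simpa [he] using h
    · simpa [he] using PySem.Dict.nodup_keys_insert m it.1 _ h

theorem pv_nodup_merged (nodes : List (String × List (Int × List String)))
    (m : PySem.Dict Int (List String)) (h : m.keys.Nodup) :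
    ((nodes.foldl (fun m node => node.2.foldl (fun m it => if it.2 = [] then m
       else m.insert it.1 (m.getD it.1 [] ++ it.2)) m) m).keys.Nodup) := by
  induction nodes generalizing m with
  | nil => exact h
  | cons node rest ih =>
    simp only [List.foldl_cons]
    exact ih _ (pv_nodup_node node.2 m h)

-- ===== VERDICT =====
theorem bucket_data_summary_spec : Claim_equal_bucket_data_summary := by
  intro e _ _
  unfold Spec_bucket_data_summary bucket_data_summary bucket_data_summary_alt
  have hA := pv_outerR e PySem.Dict.empty
  have hstart : (PySem.Dict.mk ((PySem.Dict.empty : PySem.Dict Int (List String)).items.map pvDed))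
      = (PySem.Dict.empty : PySem.Dict Int (List String)) := rfl
  rw [hstart] at hA
  rw [hA]
  have hnd : ((e.foldl (fun m node => node.2.foldl (fun m it => if it.2 = [] then m
      else m.insert it.1 (m.getD it.1 [] ++ it.2)) m) PySem.Dict.empty).keys.Nodup) :=
    pv_nodup_merged e PySem.Dict.empty (by simp [PySem.Dict.keys_empty])
  set merged := e.foldl (fun m node => node.2.foldl (fun m it => if it.2 = [] then m
      else m.insert it.1 (m.getD it.1 [] ++ it.2)) m)
      (PySem.Dict.empty : PySem.Dict Int (List String)) with hmerged
  have hB := PySem.Dict.items_foldl_insert_fresh (l := merged.items) (k := Prod.fst)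
      (v := fun p => PySem.List.dedup p.2) (d := (PySem.Dict.empty : PySem.Dict Int (List String)))
      (by intro a _; exact PySem.Dict.contains_empty _)
      (by simpa [PySem.Dict.keys] using hnd)
  simp only [hB]
  rfl
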